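-- pv_equiv track=rewrite | github.com/MrBrantCode/unitest_baseline | mut_generate/mist_train_cf/cf_8261/solution.py | sum_and_max_product
-- ===== SOURCE A (Python) =====
-- def sum_and_max_product(matrix):
--     """
--     This function calculates the sum of all elements in a given 2D matrix
--     where each element is multiplied by its row index and the maximum product among all rows.
--
--     Args:
--         matrix (list): A 2D list of integers.
--
--     Returns:
--         tuple: A tuple containing the calculated sum and the maximum product.
--     """
--     row_sum = 0
--     max_product = float('-inf')  # initialize with negative infinity
--
--     for i in range(len(matrix)):
--         row_product = 1  # initialize product for each row
--         for j in range(len(matrix[i])):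
--             row_sum += matrix[i][j] * i  # calculate sum of elements multiplied by row index
--             row_product *= matrix[i][j]  # calculate product of elements in the row
--
--         if row_product > max_product:
--             max_product = row_product  # update maximum product if necessary
--
--     return row_sum, max_product
-- ===== SOURCE B (Python) =====
-- def sum_and_max_product(matrix):
--     # Back-to-front pass: instead of multiplying each element by its row index,
--     # exploit the identity  sum_i i*S_i = sum of suffix totals  — whenever a row is
--     # prepended, every later row's index shifts up by one, adding the running total.
--     weighted = 0
--     total = 0
--     best = float('-inf')
--     for row in reversed(matrix):
--         weighted += total
--         total += sum(row)
--         p = 1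
--         for x in row:
--             p *= x
--         if p > best:
--             best = p
--     return weighted, best
-- ===== Notes on version B (the rewrite author's own statement) =====
-- stated objective: alternative
-- what changed: B runs once over the rows in reverse and never multiplies by a row index: it uses the suffix-total identity sum_i i*S_i = sum of suffix row totals (prepending a row shifts every later index up by one, adding the running total), tracking the max row product in the same backward pass.
-- outside the precondition, e.g. on sum_and_max_product([]): A returns (0, -inf), B returns (0, -inf)
import Mathlib
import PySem

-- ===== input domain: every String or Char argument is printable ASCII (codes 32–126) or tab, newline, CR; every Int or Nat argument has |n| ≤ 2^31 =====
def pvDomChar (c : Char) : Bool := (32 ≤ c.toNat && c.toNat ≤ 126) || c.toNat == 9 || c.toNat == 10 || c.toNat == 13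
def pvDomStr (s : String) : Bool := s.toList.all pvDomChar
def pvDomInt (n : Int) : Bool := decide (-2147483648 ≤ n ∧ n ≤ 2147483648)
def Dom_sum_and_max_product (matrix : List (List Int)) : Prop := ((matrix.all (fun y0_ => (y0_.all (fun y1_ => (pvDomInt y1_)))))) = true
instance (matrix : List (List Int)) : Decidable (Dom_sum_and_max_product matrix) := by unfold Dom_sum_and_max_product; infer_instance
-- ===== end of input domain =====

-- B traverses the rows backwards without any index multiplication, using the suffix-total
-- identity sum_i i*S_i = sum of suffix row totals; same cost, a different algorithm.

-- ===== PORT A =====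
-- loop body of A's outer `for i in range(len(matrix))` (the inner `for j in range(len(matrix[i]))`
-- is the inner foldl); float('-inf') is modelled as `none`.
def pvStepA (st : Int × Option Int) (i : Int) (row : List Int) : Int × Option Int :=
  let inner := (PySem.List.pyRange 0 (row.length : Int) 1).foldl
    (fun (p : Int × Int) j =>
      (p.1 + PySem.List.pyGetD row j 0 * i, p.2 * PySem.List.pyGetD row j 0))
    (st.1, 1)
  (inner.1,
    match st.2 with
    | none => some inner.2
    | some m => if inner.2 > m then some inner.2 else some m)

-- the final `.getD 0` is only reached on the empty matrix (max_product still float('-inf') there),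
-- which Pre_ excludes: Python returns a float, not an int, on that input.
def sum_and_max_product (matrix : List (List Int)) : Int × Int :=
  let st := (PySem.List.pyRange 0 (matrix.length : Int) 1).foldl
    (fun st i => pvStepA st i (PySem.List.pyGetD matrix i []))
    ((0 : Int), (none : Option Int))
  (st.1, st.2.getD 0)

-- ===== PORT B =====
-- `p = 1; for x in row: p *= x` of Source B
def pvProd (row : List Int) : Int := row.foldl (fun p x => p * x) 1

-- the body of Source B's `for row in reversed(matrix)` loop over state (weighted, total, best)
def pvBStep (st : Int × Int × Option Int) (row : List Int) : Int × Int × Option Int :=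
  let weighted := st.1 + st.2.1
  let total := st.2.1 + row.sum
  let p := pvProd row
  let best :=
    match st.2.2 with
    | none => some p
    | some b => if p > b then some p else some b
  (weighted, total, best)

-- `.getD 0` is only reached on the empty matrix (best still float('-inf')), excluded by Pre_.
def sum_and_max_product_alt (matrix : List (List Int)) : Int × Int :=
  let st := matrix.reverse.foldl pvBStep ((0 : Int), (0 : Int), (none : Option Int))
  (st.1, st.2.2.getD 0)

-- ===== PRECONDITION & SPEC =====
-- Pre_ excludes only the empty matrix, on which A (and B) return float('-inf') — not an int.
def Pre_sum_and_max_product (matrix : List (List Int)) : Prop := matrix ≠ []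
instance (matrix : List (List Int)) : Decidable (Pre_sum_and_max_product matrix) := by
  unfold Pre_sum_and_max_product; infer_instance

def pvWitness_sum_and_max_product : List (List Int) := [[1, 2], [3]]

def Spec_sum_and_max_product (matrix : List (List Int)) (out : Int × Int) : Prop := out = sum_and_max_product_alt matrix
instance (matrix : List (List Int)) (out : Int × Int) : Decidable (Spec_sum_and_max_product matrix out) := by unfold Spec_sum_and_max_product; infer_instance

-- ===== CLAIM (what is proved, stated in full; the proofs are below) =====
def Claim_equal_sum_and_max_product : Prop := ∀ (matrix : List (List Int)), Dom_sum_and_max_product matrix → Pre_sum_and_max_product matrix → Spec_sum_and_max_product matrix (sum_and_max_product matrix)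

-- ===== LEMMAS AND PROOFS =====

theorem pyGetD_cons_shift {α : Type} (x : α) (xs : List α) (d : α) (k : Int) (h : 1 ≤ k) :
    PySem.List.pyGetD (x :: xs) k d = PySem.List.pyGetD xs (k - 1) d := by
  rw [PySem.List.pyGetD_of_nonneg (x :: xs) d (by omega),
      PySem.List.pyGetD_of_nonneg xs d (by omega)]
  have : k.toNat = (k - 1).toNat + 1 := by omega
  rw [this]
  simp [List.getD]

-- `for i in range(len(xs)): … xs[i] …`, body also using i, as a fold over enumerate
theorem foldl_range_enum {α β : Type} (d : α) (g : β → Int → α → β) :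
    ∀ (xs : List α) (a : Int) (init : β),
      (PySem.List.pyRange a (a + (xs.length : Int)) 1).foldl
          (fun acc i => g acc i (PySem.List.pyGetD xs (i - a) d)) init
        = (PySem.List.enumerate xs a).foldl (fun acc p => g acc p.1 p.2) init := by
  intro xs
  induction xs with
  | nil =>
      intro a init
      simp [PySem.List.pyRange_one_eq_nil (le_refl a), PySem.List.enumerate]
  | cons x xs ih =>
      intro a init
      have hcons : PySem.List.pyRange a (a + ((x :: xs).length : Int)) 1
          = a :: PySem.List.pyRange (a + 1) (a + ((x :: xs).length : Int)) 1 :=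
        PySem.List.pyRange_one_cons (by simp)
      rw [hcons, PySem.List.enumerate_cons]
      simp only [List.foldl_cons, sub_self]
      have hget0 : PySem.List.pyGetD (x :: xs) 0 d = x := by
        simp [PySem.List.pyGetD, PySem.List.pyGet?, PySem.List.pyIdx?]
      rw [hget0]
      have hrng : a + ((x :: xs).length : Int) = (a + 1) + (xs.length : Int) := by
        simp; ring
      rw [hrng]
      have hcong :
          (PySem.List.pyRange (a + 1) ((a + 1) + (xs.length : Int)) 1).foldl
              (fun acc i => g acc i (PySem.List.pyGetD (x :: xs) (i - a) d)) (g init a x)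
            = (PySem.List.pyRange (a + 1) ((a + 1) + (xs.length : Int)) 1).foldl
              (fun acc i => g acc i (PySem.List.pyGetD xs (i - (a + 1)) d)) (g init a x) := by
        refine PySem.List.foldl_congr_mem' _ _ _ _ ?_
        intro i hi acc
        have hm := PySem.List.mem_pyRange_one.mp hi
        rw [pyGetD_cons_shift x xs d (i - a) (by omega)]
        have : i - a - 1 = i - (a + 1) := by ring
        rw [this]
      rw [hcong]
      exact ih (a + 1) (g init a x)

theorem foldl_mul (row : List Int) :
    ∀ q : Int, row.foldl (fun p x => p * x) q = q * row.foldl (fun p x => p * x) 1 := by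
  induction row with
  | nil => intro q; simp
  | cons x row ih =>
      intro q
      simp only [List.foldl_cons]
      rw [ih (q * x), ih (1 * x)]; ring

theorem pvProd_cons (x : Int) (row : List Int) : pvProd (x :: row) = x * pvProd row := by
  simp only [pvProd, List.foldl_cons]
  rw [foldl_mul row (1 * x)]; ring

theorem innerFold (row : List Int) (i : Int) :
    ∀ s q : Int, row.foldl (fun (p : Int × Int) x => (p.1 + x * i, p.2 * x)) (s, q)
      = (s + row.sum * i, q * pvProd row) := by
  induction row with
  | nil => intro s q; simp [pvProd]
  | cons x row ih =>
      intro s q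
      simp only [List.foldl_cons, ih, List.sum_cons, pvProd_cons, Prod.mk.injEq]
      exact ⟨by ring, by ring⟩

-- the max-update shared by A's outer loop and Source B's `if p > best`
def pvMaxStep (m : Option Int) (q : Int) : Option Int :=
  match m with
  | none => some q
  | some mm => if q > mm then some q else some mm

theorem stepA_eq (s : Int) (m : Option Int) (i : Int) (row : List Int) :
    pvStepA (s, m) i row = (s + row.sum * i, pvMaxStep m (pvProd row)) := by
  unfold pvStepA
  rw [PySem.List.foldl_pyRange_zero_pyGetD' row 0
        (fun (p : Int × Int) x => (p.1 + x * i, p.2 * x)) ((s, m).1, 1)]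
  rw [innerFold row i (s, m).1 1]
  simp [pvMaxStep, one_mul]

theorem outerA (matrix : List (List Int)) :
    ∀ (a s : Int) (m : Option Int),
      (PySem.List.enumerate matrix a).foldl (fun st p => pvStepA st p.1 p.2) (s, m)
        = (s + ((PySem.List.enumerate matrix a).map (fun p => p.1 * p.2.sum)).sum,
           matrix.foldl (fun mm row => pvMaxStep mm (pvProd row)) m) := by
  induction matrix with
  | nil => intro a s m; simp [PySem.List.enumerate]
  | cons row matrix ih =>
      intro a s m
      simp only [PySem.List.enumerate_cons, List.foldl_cons, List.map_cons, List.sum_cons,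
        stepA_eq]
      rw [ih (a + 1) (s + row.sum * a) (pvMaxStep m (pvProd row))]
      simp only [Prod.mk.injEq]
      exact ⟨by ring, trivial⟩

theorem pvMaxStep_swap (m : Option Int) (a b : Int) :
    pvMaxStep (pvMaxStep m a) b = pvMaxStep (pvMaxStep m b) a := by
  have hmax : ∀ (mm q : Int), pvMaxStep (some mm) q = some (max mm q) := by
    intro mm q
    simp only [pvMaxStep]
    split_ifs with h
    · rw [max_eq_right (by omega)]
    · rw [max_eq_left (by omega)]
  cases m with
  | none =>
      show pvMaxStep (some a) b = pvMaxStep (some b) a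
      rw [hmax, hmax, max_comm]
  | some mm =>
      rw [hmax mm a, hmax mm b, hmax, hmax, max_right_comm]

theorem foldl_maxstep_shift (l : List (List Int)) :
    ∀ (m : Option Int) (row : List Int),
      l.foldl (fun mm r => pvMaxStep mm (pvProd r)) (pvMaxStep m (pvProd row))
        = pvMaxStep (l.foldl (fun mm r => pvMaxStep mm (pvProd r)) m) (pvProd row) := by
  induction l with
  | nil => intro m row; rfl
  | cons y l ih =>
      intro m row
      simp only [List.foldl_cons]
      rw [pvMaxStep_swap m (pvProd row) (pvProd y), ih (pvMaxStep m (pvProd y)) row]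

-- Source B's reversed-order max equals A's forward max
theorem foldr_max_eq_foldl (l : List (List Int)) :
    ∀ m : Option Int,
      l.foldr (fun r mm => pvMaxStep mm (pvProd r)) m
        = l.foldl (fun mm r => pvMaxStep mm (pvProd r)) m := by
  induction l with
  | nil => intro m; rfl
  | cons row l ih =>
      intro m
      simp only [List.foldr_cons, List.foldl_cons, ih]
      exact (foldl_maxstep_shift l m row).symm

-- the suffix-shift identity behind Source B: bumping every index by one adds the total sum
theorem enum_shift (xs : List (List Int)) :
    ∀ a : Int,
      ((PySem.List.enumerate xs (a + 1)).map (fun p => p.1 * p.2.sum)).sum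
        = ((PySem.List.enumerate xs a).map (fun p => p.1 * p.2.sum)).sum
          + (xs.map List.sum).sum := by
  induction xs with
  | nil => intro a; simp [PySem.List.enumerate]
  | cons x xs ih =>
      intro a
      simp only [PySem.List.enumerate_cons, List.map_cons, List.sum_cons]
      rw [ih (a + 1)]
      ring

theorem bFold (matrix : List (List Int)) :
    matrix.foldr (fun row st => pvBStep st row) ((0 : Int), (0 : Int), (none : Option Int))
      = (((PySem.List.enumerate matrix 0).map (fun p => p.1 * p.2.sum)).sum,
         (matrix.map List.sum).sum,
         matrix.foldr (fun r mm => pvMaxStep mm (pvProd r)) none) := by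
  induction matrix with
  | nil => simp [PySem.List.enumerate]
  | cons row matrix ih =>
      simp only [List.foldr_cons, ih]
      unfold pvBStep
      simp only [PySem.List.enumerate_cons, List.map_cons, List.sum_cons, Prod.mk.injEq]
      refine ⟨?_, by ring, rfl⟩
      rw [enum_shift matrix 0]
      ring

-- ===== VERDICT (by name: the statement is the Claim_ definition above) =====
theorem sum_and_max_product_spec : Claim_equal_sum_and_max_product := by
  intro matrix _ _
  unfold Spec_sum_and_max_product sum_and_max_product sum_and_max_product_alt
  have h0 := foldl_range_enum ([] : List Int) pvStepA matrix 0 ((0 : Int), (none : Option Int))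
  simp only [zero_add, sub_zero] at h0
  rw [List.foldl_reverse, h0, outerA matrix 0 0 none, bFold matrix,
      foldr_max_eq_foldl matrix none]
  simp
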